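-- pv_equiv track=rewrite | github.com/zhouby-zjl/pathplanner | dcn_sim.py | getInfluencedPaths
-- ===== SOURCE A (Python) =====
-- def getInfluencedPaths(sampled_flow_idxes, flow_and_path_info_all, col_idx, n_flows):
--     links_all = set()
--     sfi_all = set(sampled_flow_idxes)
--     for idx in sampled_flow_idxes:
--         p = flow_and_path_info_all[idx][col_idx]
--         for j in range(0, len(p) - 1):
--             links_all.add((p[j] << 16) + p[j + 1])
--
--     influencedIdxes = sampled_flow_idxes.copy()
--     for i in range(n_flows):
--         if i in sfi_all:
--             continue
--         p = flow_and_path_info_all[i][col_idx]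
--         for j in range(0, len(p) - 1):
--             l_hash = (p[j] << 16) + p[j + 1]
--             if l_hash in links_all:
--                 influencedIdxes.append(i)
--                 break
--
--     influencedIdxes.sort()
--     return influencedIdxes
-- ===== SOURCE B (Python) =====
-- def getInfluencedPaths(sampled_flow_idxes, flow_and_path_info_all, col_idx, n_flows):
--     # Inverted index: link-hash -> non-sampled flows using that link; then query it
--     # with the sampled flows' links instead of scanning every flow against a link set.
--     sfi = set(sampled_flow_idxes)
--     index = {}
--     for i in range(n_flows):
--         if i in sfi:
--             continue
--         p = flow_and_path_info_all[i][col_idx]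
--         for a, b in zip(p, p[1:]):
--             index.setdefault((a << 16) + b, []).append(i)
--     influenced = set()
--     for idx in sampled_flow_idxes:
--         p = flow_and_path_info_all[idx][col_idx]
--         for a, b in zip(p, p[1:]):
--             for k in index.get((a << 16) + b, []):
--                 influenced.add(k)
--     return sorted(sampled_flow_idxes + list(influenced))
-- ===== Notes on version B (the rewrite author's own statement) =====
-- stated objective: alternative
-- what changed: Instead of building the sampled-link set and scanning every non-sampled flow's path against it with an early break, B builds an inverted index link-hash -> list of non-sampled flows in one pass and then queries it with the sampled flows' links, set-deduplicating the hits before sorting them together with the verbatim sampled list.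
import Mathlib
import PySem

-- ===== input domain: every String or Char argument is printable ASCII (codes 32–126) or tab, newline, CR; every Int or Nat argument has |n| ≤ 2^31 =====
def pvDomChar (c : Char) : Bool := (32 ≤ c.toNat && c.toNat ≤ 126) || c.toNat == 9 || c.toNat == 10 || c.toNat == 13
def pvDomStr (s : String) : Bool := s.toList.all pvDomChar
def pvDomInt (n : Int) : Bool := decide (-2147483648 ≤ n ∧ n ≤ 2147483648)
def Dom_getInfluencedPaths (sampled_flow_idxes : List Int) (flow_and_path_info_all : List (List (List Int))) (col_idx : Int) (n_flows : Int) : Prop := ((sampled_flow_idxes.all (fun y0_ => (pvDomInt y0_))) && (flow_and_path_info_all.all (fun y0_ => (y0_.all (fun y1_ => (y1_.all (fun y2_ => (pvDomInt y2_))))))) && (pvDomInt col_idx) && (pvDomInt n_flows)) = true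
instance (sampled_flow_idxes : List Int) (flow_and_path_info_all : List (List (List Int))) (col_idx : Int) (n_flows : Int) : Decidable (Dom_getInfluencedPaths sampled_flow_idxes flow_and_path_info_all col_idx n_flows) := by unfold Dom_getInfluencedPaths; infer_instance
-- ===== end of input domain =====

-- B replaces A's scan of every non-sampled flow against the sampled-link set by an
-- inverted index link-hash -> non-sampled flows, queried with the sampled flows' links
-- (objective: alternative decomposition, same cost).

-- shared accessor: flow_and_path_info_all[idx][col_idx] (Pre_ guarantees both lookups succeed)
def pvPath (fa : List (List (List Int))) (idx col : Int) : List Int :=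
  (PySem.List.pyGet? ((PySem.List.pyGet? fa idx).getD []) col).getD []

-- ===== PORT A =====
-- (p[j] << 16) + p[j+1]; '<<' on a Python int is exactly multiplication by 2^16
def pvHashA (p : List Int) (j : Int) : Int :=
  PySem.List.pyGetD p j 0 * 65536 + PySem.List.pyGetD p (j + 1) 0

def pvLinksAllA (s : List Int) (fa : List (List (List Int))) (col : Int) : PySem.Set Int :=
  s.foldl (fun links_all idx =>
    (PySem.List.pyRange 0 (((pvPath fa idx col).length : Int) - 1) 1).foldl
      (fun links_all j => PySem.Set.add links_all (pvHashA (pvPath fa idx col) j)) links_all)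
    PySem.Set.empty

def getInfluencedPaths (sampled_flow_idxes : List Int) (flow_and_path_info_all : List (List (List Int))) (col_idx : Int) (n_flows : Int) : List Int :=
  let sfi_all : PySem.Set Int := PySem.Set.ofList sampled_flow_idxes
  let links_all := pvLinksAllA sampled_flow_idxes flow_and_path_info_all col_idx
  let influencedIdxes := (PySem.List.pyRange 0 n_flows 1).foldl (fun acc i =>
    if PySem.Set.contains sfi_all i then acc
    -- 'append then break' = append i once iff some link of p is in links_all
    else if (PySem.List.pyRange 0 (((pvPath flow_and_path_info_all i col_idx).length : Int) - 1) 1).any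
          (fun j => PySem.Set.contains links_all (pvHashA (pvPath flow_and_path_info_all i col_idx) j)) then acc ++ [i]
      else acc) sampled_flow_idxes
  PySem.List.sorted influencedIdxes (fun x => x) false

-- ===== PORT B =====
-- link hashes of a path via zip(p, p[1:]) ('<<' again as *65536)
def pvHashB (p : List Int) : List Int :=
  (p.zip p.tail).map (fun ab => ab.1 * 65536 + ab.2)

-- index.setdefault(h, []).append(i)  =  modify h [] (· ++ [i])
def pvIndexB (s : List Int) (fa : List (List (List Int))) (col n : Int) : PySem.Dict Int (List Int) :=
  (PySem.List.pyRange 0 n 1).foldl (fun index i =>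
    if PySem.Set.contains (PySem.Set.ofList s) i then index
    else
      (pvHashB (pvPath fa i col)).foldl
        (fun index l => PySem.Dict.modify index l [] (fun b => b ++ [i])) index)
    PySem.Dict.empty

def pvInfluencedB (s : List Int) (fa : List (List (List Int))) (col : Int) (index : PySem.Dict Int (List Int)) : PySem.Set Int :=
  s.foldl (fun influenced idx =>
    (pvHashB (pvPath fa idx col)).foldl
      (fun influenced l => (PySem.Dict.getD index l []).foldl PySem.Set.add influenced) influenced)
    PySem.Set.empty

def getInfluencedPaths_alt (sampled_flow_idxes : List Int) (flow_and_path_info_all : List (List (List Int))) (col_idx : Int) (n_flows : Int) : List Int :=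
  let index := pvIndexB sampled_flow_idxes flow_and_path_info_all col_idx n_flows
  let influenced := pvInfluencedB sampled_flow_idxes flow_and_path_info_all col_idx index
  PySem.List.sorted (sampled_flow_idxes ++ influenced) (fun x => x) false

-- ===== PRECONDITION & SPEC =====
-- Pre_ excludes exactly the inputs where Python A raises IndexError: some accessed
-- flow_and_path_info_all[idx][col_idx] (for a sampled idx, or for a non-sampled i in
-- range(n_flows)) is out of range.
def pvAcc (fa : List (List (List Int))) (idx col : Int) : Prop :=
  ((PySem.List.pyGet? fa idx).bind (fun row => PySem.List.pyGet? row col)).isSome = true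

def Pre_getInfluencedPaths (sampled_flow_idxes : List Int) (flow_and_path_info_all : List (List (List Int))) (col_idx : Int) (n_flows : Int) : Prop :=
  (∀ idx ∈ sampled_flow_idxes, pvAcc flow_and_path_info_all idx col_idx) ∧
  (∀ i ∈ PySem.List.pyRange 0 n_flows 1, i ∈ sampled_flow_idxes ∨ pvAcc flow_and_path_info_all i col_idx)

instance (sampled_flow_idxes : List Int) (flow_and_path_info_all : List (List (List Int))) (col_idx : Int) (n_flows : Int) : Decidable (Pre_getInfluencedPaths sampled_flow_idxes flow_and_path_info_all col_idx n_flows) := by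
  unfold Pre_getInfluencedPaths pvAcc; infer_instance

def pvWitness_getInfluencedPaths : List Int × List (List (List Int)) × Int × Int :=
  ([0], [[[1, 2]], [[2, 3]]], 0, 2)

def Spec_getInfluencedPaths (sampled_flow_idxes : List Int) (flow_and_path_info_all : List (List (List Int))) (col_idx : Int) (n_flows : Int) (out : List Int) : Prop := out = getInfluencedPaths_alt sampled_flow_idxes flow_and_path_info_all col_idx n_flows
instance (sampled_flow_idxes : List Int) (flow_and_path_info_all : List (List (List Int))) (col_idx : Int) (n_flows : Int) (out : List Int) : Decidable (Spec_getInfluencedPaths sampled_flow_idxes flow_and_path_info_all col_idx n_flows out) := by unfold Spec_getInfluencedPaths; infer_instance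

-- ===== CLAIM (what is proved, stated in full; the proofs are below) =====
def Claim_equal_getInfluencedPaths : Prop := ∀ (sampled_flow_idxes : List Int) (flow_and_path_info_all : List (List (List Int))) (col_idx : Int) (n_flows : Int), Dom_getInfluencedPaths sampled_flow_idxes flow_and_path_info_all col_idx n_flows → Pre_getInfluencedPaths sampled_flow_idxes flow_and_path_info_all col_idx n_flows → Spec_getInfluencedPaths sampled_flow_idxes flow_and_path_info_all col_idx n_flows (getInfluencedPaths sampled_flow_idxes flow_and_path_info_all col_idx n_flows)

-- ===== LEMMAS AND PROOFS =====

-- the two link enumerations agree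
theorem pvLinks_eq (p : List Int) :
    (PySem.List.pyRange 0 ((p.length : Int) - 1) 1).map (fun j => pvHashA p j) = pvHashB p := by
  unfold pvHashA pvHashB
  apply List.ext_getElem
  · simp [PySem.List.length_pyRange_one]
  · intro k hk1 hk2
    simp only [List.getElem_map, PySem.List.getElem_pyRange_one, List.getElem_zip]
    have hlen : k < p.length - 1 := by
      simp [PySem.List.length_pyRange_one] at hk1; omega
    have h1 : PySem.List.pyGetD p (0 + (k : Int)) 0 = p[k] := by
      rw [show (0 + (k : Int)) = ((k : Nat) : Int) by omega]
      rw [PySem.List.pyGetD_natCast, List.getD_eq_getElem?_getD, List.getElem?_eq_getElem (by omega)]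
      rfl
    have h2 : PySem.List.pyGetD p (0 + (k : Int) + 1) 0 = p[k + 1] := by
      rw [show (0 + (k : Int) + 1) = (((k + 1 : Nat)) : Int) by omega]
      rw [PySem.List.pyGetD_natCast, List.getD_eq_getElem?_getD, List.getElem?_eq_getElem (by omega)]
      rfl
    rw [h1, h2, List.getElem_tail]

theorem pvMemHashB (p : List Int) (l : Int) :
    (∃ x ∈ PySem.List.pyRange 0 ((p.length : Int) - 1) 1, l = pvHashA p x) ↔ l ∈ pvHashB p := by
  rw [← pvLinks_eq p]
  simp [List.mem_map, eq_comm]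

-- generic membership invariant for a set-building fold
theorem pvMemFoldlStep {α : Type} (F : PySem.Set Int → α → PySem.Set Int) (P : α → Int → Prop)
    (h : ∀ st x j, j ∈ F st x ↔ j ∈ st ∨ P x j) :
    ∀ (L : List α) (s0 : PySem.Set Int) (j : Int),
      j ∈ L.foldl F s0 ↔ j ∈ s0 ∨ ∃ x ∈ L, P x j := by
  intro L
  induction L with
  | nil => simp
  | cons x L ih =>
    intro s0 j
    simp only [List.foldl_cons, ih, h, List.mem_cons]
    constructor
    · rintro ((hj | hp) | ⟨y, hy, hp⟩)
      · exact Or.inl hj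
      · exact Or.inr ⟨x, Or.inl rfl, hp⟩
      · exact Or.inr ⟨y, Or.inr hy, hp⟩
    · rintro (hj | ⟨y, (rfl | hy), hp⟩)
      · exact Or.inl (Or.inl hj)
      · exact Or.inl (Or.inr hp)
      · exact Or.inr ⟨y, hy, hp⟩

theorem pvMemLinksAllA (s : List Int) (fa : List (List (List Int))) (col : Int) (l : Int) :
    l ∈ pvLinksAllA s fa col ↔ ∃ idx ∈ s, l ∈ pvHashB (pvPath fa idx col) := by
  unfold pvLinksAllA
  rw [pvMemFoldlStep _ (fun idx l => l ∈ pvHashB (pvPath fa idx col))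
      (fun st idx l => by
        rw [pvMemFoldlStep _ (fun j l => l = pvHashA (pvPath fa idx col) j)
            (fun st j l => PySem.Set.mem_add _ _ _)]
        exact or_congr Iff.rfl (pvMemHashB _ _))]
  simp [PySem.Set.empty]

theorem pvMemBucket (L : List Int) (i : Int) :
    ∀ (d : PySem.Dict Int (List Int)) (c j : Int),
      j ∈ PySem.Dict.getD (L.foldl (fun d l => PySem.Dict.modify d l [] (fun b => b ++ [i])) d) c []
        ↔ j ∈ PySem.Dict.getD d c [] ∨ (j = i ∧ c ∈ L) := by
  induction L with
  | nil => simp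
  | cons l L ih =>
    intro d c j
    simp only [List.foldl_cons, ih, PySem.Dict.getD_modify, List.mem_cons]
    by_cases hc : c = l <;> simp [hc] <;> tauto

theorem pvMemIndexB (s : List Int) (fa : List (List (List Int))) (col n : Int) (c j : Int) :
    j ∈ PySem.Dict.getD (pvIndexB s fa col n) c []
      ↔ j ∈ PySem.List.pyRange 0 n 1 ∧ j ∉ s ∧ c ∈ pvHashB (pvPath fa j col) := by
  unfold pvIndexB
  have aux : ∀ (R : List Int) (d : PySem.Dict Int (List Int)),
      j ∈ PySem.Dict.getD (R.foldl (fun index i =>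
        if PySem.Set.contains (PySem.Set.ofList s) i then index
        else (pvHashB (pvPath fa i col)).foldl
          (fun index l => PySem.Dict.modify index l [] (fun b => b ++ [i])) index) d) c []
      ↔ j ∈ PySem.Dict.getD d c [] ∨ (j ∈ R ∧ j ∉ s ∧ c ∈ pvHashB (pvPath fa j col)) := by
    intro R
    induction R with
    | nil => simp
    | cons i R ih =>
      intro d
      by_cases hi : i ∈ s
      · have hcond : PySem.Set.contains (PySem.Set.ofList s) i = true := by
          rw [PySem.Set.contains_iff, PySem.Set.mem_ofList]; exact hi
        rw [List.foldl_cons, if_pos hcond, ih]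
        constructor
        · rintro (hj | ⟨h1, h2, h3⟩)
          · exact Or.inl hj
          · exact Or.inr ⟨List.mem_cons_of_mem _ h1, h2, h3⟩
        · rintro (hj | ⟨h1, h2, h3⟩)
          · exact Or.inl hj
          · rcases List.mem_cons.mp h1 with rfl | h1
            · exact absurd hi h2
            · exact Or.inr ⟨h1, h2, h3⟩
      · have hcond : ¬ (PySem.Set.contains (PySem.Set.ofList s) i = true) := by
          rw [PySem.Set.contains_iff, PySem.Set.mem_ofList]; exact hi
        rw [List.foldl_cons, if_neg hcond, ih, pvMemBucket]
        constructor
        · rintro ((hj | ⟨rfl, hc⟩) | ⟨h1, h2, h3⟩)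
          · exact Or.inl hj
          · exact Or.inr ⟨List.mem_cons_self, hi, hc⟩
          · exact Or.inr ⟨List.mem_cons_of_mem _ h1, h2, h3⟩
        · rintro (hj | ⟨h1, h2, h3⟩)
          · exact Or.inl (Or.inl hj)
          · rcases List.mem_cons.mp h1 with rfl | h1
            · exact Or.inl (Or.inr ⟨rfl, h3⟩)
            · exact Or.inr ⟨h1, h2, h3⟩
  rw [aux]
  simp [PySem.Dict.getD_empty]

theorem pvMemInfluencedB (s : List Int) (fa : List (List (List Int))) (col n : Int) (j : Int) :
    j ∈ pvInfluencedB s fa col (pvIndexB s fa col n)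
      ↔ ∃ idx ∈ s, ∃ l ∈ pvHashB (pvPath fa idx col),
          j ∈ PySem.List.pyRange 0 n 1 ∧ j ∉ s ∧ l ∈ pvHashB (pvPath fa j col) := by
  unfold pvInfluencedB
  rw [pvMemFoldlStep _ (fun idx j => ∃ l ∈ pvHashB (pvPath fa idx col),
        j ∈ PySem.Dict.getD (pvIndexB s fa col n) l [])
      (fun st idx j => by
        rw [pvMemFoldlStep _ (fun l j => j ∈ PySem.Dict.getD (pvIndexB s fa col n) l [])
            (fun st l j => by
              rw [pvMemFoldlStep _ (fun b j => j = b) (fun st b j => PySem.Set.mem_add _ _ _)]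
              simp)])]
  simp only [PySem.Set.empty, List.not_mem_nil, false_or]
  constructor
  · rintro ⟨idx, hidx, l, hl, hb⟩
    exact ⟨idx, hidx, l, hl, (pvMemIndexB s fa col n l j).mp hb⟩
  · rintro ⟨idx, hidx, l, hl, hb⟩
    exact ⟨idx, hidx, l, hl, (pvMemIndexB s fa col n l j).mpr hb⟩

theorem pvNodupFoldlStep {α : Type} (F : PySem.Set Int → α → PySem.Set Int)
    (h : ∀ st x, List.Nodup st → List.Nodup (F st x)) :
    ∀ (L : List α) (s0 : PySem.Set Int), List.Nodup s0 → List.Nodup (L.foldl F s0) := by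
  intro L
  induction L with
  | nil => intro s0 h0; exact h0
  | cons x L ih => intro s0 h0; exact ih _ (h _ x h0)

theorem pvNodupInfluencedB (s : List Int) (fa : List (List (List Int))) (col : Int) (index : PySem.Dict Int (List Int)) :
    List.Nodup (pvInfluencedB s fa col index) := by
  unfold pvInfluencedB
  apply pvNodupFoldlStep _ (fun st idx h0 =>
    pvNodupFoldlStep _ (fun st l h1 =>
      pvNodupFoldlStep _ (fun st b h2 => PySem.Set.nodup_add _ _ h2) _ _ h1) _ _ h0)
  exact List.nodup_nil

theorem pvAnyCond_iff (links : PySem.Set Int) (p : List Int) :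
    ((PySem.List.pyRange 0 ((p.length : Int) - 1) 1).any
      (fun j => PySem.Set.contains links (pvHashA p j)) = true) ↔ ∃ l ∈ pvHashB p, l ∈ links := by
  rw [List.any_eq_true]
  constructor
  · rintro ⟨j, hj, hc⟩
    exact ⟨pvHashA p j, (pvMemHashB p _).mp ⟨j, hj, rfl⟩, (PySem.Set.contains_iff _ _).mp hc⟩
  · rintro ⟨l, hl, hc⟩
    rcases (pvMemHashB p l).mpr hl with ⟨j, hj, rfl⟩
    exact ⟨j, hj, (PySem.Set.contains_iff _ _).mpr hc⟩

theorem pvContains_false (s : List Int) (a : Int) :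
    (PySem.Set.contains (PySem.Set.ofList s) a = false) ↔ a ∉ s := by
  rw [Bool.eq_false_iff]
  constructor
  · intro h hm
    exact h ((PySem.Set.contains_iff _ _).mpr ((PySem.Set.mem_ofList _ _).mpr hm))
  · intro h hc
    exact h ((PySem.Set.mem_ofList _ _).mp ((PySem.Set.contains_iff _ _).mp hc))

theorem pvPerm (s : List Int) (fa : List (List (List Int))) (col n : Int) :
    List.Perm
      ((PySem.List.pyRange 0 n 1).foldl (fun acc i =>
        if PySem.Set.contains (PySem.Set.ofList s) i then acc
        else if (PySem.List.pyRange 0 (((pvPath fa i col).length : Int) - 1) 1).any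
            (fun j => PySem.Set.contains (pvLinksAllA s fa col) (pvHashA (pvPath fa i col) j)) then acc ++ [i]
        else acc) s)
      (s ++ pvInfluencedB s fa col (pvIndexB s fa col n)) := by
  have hfun : (fun (acc : List Int) (i : Int) =>
      if PySem.Set.contains (PySem.Set.ofList s) i then acc
      else if (PySem.List.pyRange 0 (((pvPath fa i col).length : Int) - 1) 1).any
          (fun j => PySem.Set.contains (pvLinksAllA s fa col) (pvHashA (pvPath fa i col) j)) then acc ++ [i]
      else acc)
    = (fun acc i =>
      if (!PySem.Set.contains (PySem.Set.ofList s) i &&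
          (PySem.List.pyRange 0 (((pvPath fa i col).length : Int) - 1) 1).any
            (fun j => PySem.Set.contains (pvLinksAllA s fa col) (pvHashA (pvPath fa i col) j)))
        then acc ++ [i] else acc) := by
    funext acc i
    by_cases h1 : i ∈ s
    · have hc : PySem.Set.contains (PySem.Set.ofList s) i = true := by
        rw [PySem.Set.contains_iff, PySem.Set.mem_ofList]; exact h1
      rw [if_pos hc, hc]
      simp
    · have hc : PySem.Set.contains (PySem.Set.ofList s) i = false := (pvContains_false s i).mpr h1
      rw [if_neg (by rw [PySem.Set.contains_iff, PySem.Set.mem_ofList]; exact h1), hc]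
      simp only [Bool.not_false, Bool.true_and]
  rw [hfun, PySem.List.foldl_append_if_eq_filter]
  apply List.Perm.append_left
  rw [List.perm_ext_iff_of_nodup
    (List.Nodup.filter _ (PySem.List.nodup_pyRange_one _ _)) (pvNodupInfluencedB _ _ _ _)]
  intro a
  rw [List.mem_filter, pvMemInfluencedB, Bool.and_eq_true, Bool.not_eq_true', pvAnyCond_iff,
    pvContains_false]
  simp only [pvMemLinksAllA]
  constructor
  · rintro ⟨hR, hns, l, hla, idx, hidx, hli⟩
    exact ⟨idx, hidx, l, hli, hR, hns, hla⟩
  · rintro ⟨idx, hidx, l, hli, hR, hns, hla⟩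
    exact ⟨hR, hns, l, hla, idx, hidx, hli⟩

-- ===== VERDICT (by name: the statement is the Claim_ definition above) =====
theorem getInfluencedPaths_spec : Claim_equal_getInfluencedPaths := by
  intro s fa col n _ _
  show getInfluencedPaths s fa col n = getInfluencedPaths_alt s fa col n
  simp only [getInfluencedPaths, getInfluencedPaths_alt]
  exact (PySem.List.sorted_id_eq_sorted_id_iff_perm _ _).mpr (pvPerm s fa col n)
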